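-- pv_equiv track=rewrite | github.com/thalium/icebox | third_party/libdwarf/libdwarf-20190110/bugxml/bugrecord.py | paraxmlN
-- ===== SOURCE A (Python) =====
-- def xmlize(linea,inhtml,inpre):
--   outi =  []
--   l = linea
--   if l.find("<pre>") != -1:
--      if inhtml == 'y':
--        s2 = '</p>' +l + '\n'
--      else:
--        s2 = l + '\n'
--      inpre = 'y'
--      return s2,inpre
--   if l.find("</pre>") != -1:
--      if inhtml == 'y':
--        s2 = l + '\n' + "<p>"
--      else:
--        s2 = l + '\n'
--      inpre = 'n'
--      return s2, inpre
--   if inpre == 'y' and inhtml == 'n':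
--     outi += ["<preline>"]
--   for c in l:
--     if c == '<':
--        outi += ["&lt;"]
--     elif c == '>':
--        outi += ["&gt;"]
--     elif c == "&":
--        outi += ["&amp;"]
--     #elif c == "'":
--     #   outi += ["&apos;"]
--     elif c == '"':
--        outi += ["&quot;"]
--     else:
--        outi += [c]
--   if inpre == 'y' and inhtml == 'n':
--     outi += ["</preline>"]
--   outi += ["\n"]
--   s2 = ''.join(outi)
--   return s2,inpre
--
-- def paraxmlN(start,main,term):
--   # For multi line xml leave newlines present.
--   out = start
--   inpre = 'n'
--   for x in main:
--     l=x.rstrip()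
--     t,inpre = xmlize(l,'n',inpre);
--     if len(t) > 0:
--       out += t
--   out += term + "\n"
--   return out
-- ===== SOURCE B (Python) =====
-- def paraxmlN(start, main, term):
--     # xmlize inlined: boolean inpre state, HTML-escape by chained str.replace passes.
--     out = start
--     inpre = False
--     for x in main:
--         l = x.rstrip()
--         if "<pre>" in l:
--             out += l + "\n"
--             inpre = True
--         elif "</pre>" in l:
--             out += l + "\n"
--             inpre = False
--         else:
--             esc = l.replace("&", "&amp;").replace("<", "&lt;").replace(">", "&gt;").replace('"', "&quot;")
--             if inpre:
--                 out += "<preline>" + esc + "</preline>\n"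
--             else:
--                 out += esc + "\n"
--     return out + term + "\n"
-- ===== Notes on version B (the rewrite author's own statement) =====
-- stated objective: simpler
-- what changed: Folded the xmlize helper into the loop with a boolean inpre flag and replaced the per-character piece-list escape loop + join by four chained str.replace passes ('&' first), appending wrappers directly.
import Mathlib
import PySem

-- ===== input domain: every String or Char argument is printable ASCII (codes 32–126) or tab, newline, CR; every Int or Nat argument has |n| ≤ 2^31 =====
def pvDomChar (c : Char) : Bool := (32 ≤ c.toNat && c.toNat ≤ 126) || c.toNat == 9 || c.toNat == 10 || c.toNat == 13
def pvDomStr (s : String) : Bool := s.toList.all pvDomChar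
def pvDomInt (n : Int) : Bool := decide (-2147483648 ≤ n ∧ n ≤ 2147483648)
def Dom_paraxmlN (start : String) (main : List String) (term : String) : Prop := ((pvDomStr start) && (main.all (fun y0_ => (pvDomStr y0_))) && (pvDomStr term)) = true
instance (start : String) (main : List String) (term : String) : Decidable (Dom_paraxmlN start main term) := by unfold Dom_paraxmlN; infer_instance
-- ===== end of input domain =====

-- B inlines the xmlize helper (boolean inpre state) and escapes each line by four chained
-- str.replace passes instead of A's per-character piece-list build + join; objective: simpler.

-- ===== PORT A =====
-- per-character escape of A's inner 'for c in l' loop, branch order as in A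
def pvEscA (c : Char) : List Char :=
  if c = '<' then "&lt;".toList
  else if c = '>' then "&gt;".toList
  else if c = '&' then "&amp;".toList
  else if c = '"' then "&quot;".toList
  else [c]

-- literal port of xmlize (strings as List Char; outi is the Python list of string pieces)
def pvXmlizeA (l : List Char) (inhtml : String) (inpre : String) : List Char × String :=
  if PySem.Chars.find l "<pre>".toList ≠ -1 then
    ((if inhtml = "y" then "</p>".toList ++ l ++ ['\n'] else l ++ ['\n']), "y")
  else if PySem.Chars.find l "</pre>".toList ≠ -1 then
    ((if inhtml = "y" then l ++ ['\n'] ++ "<p>".toList else l ++ ['\n']), "n")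
  else
    let outi : List (List Char) := if inpre = "y" ∧ inhtml = "n" then ["<preline>".toList] else []
    let outi := l.foldl (fun acc c => acc ++ [pvEscA c]) outi
    let outi := if inpre = "y" ∧ inhtml = "n" then outi ++ ["</preline>".toList] else outi
    let outi := outi ++ [['\n']]
    (PySem.Chars.join [] outi, inpre)

-- the body of A's 'for x in main' loop
def pvStepA (st : List Char × String) (x : String) : List Char × String :=
  let l := PySem.Chars.rstrip x.toList
  let r := pvXmlizeA l "n" st.2
  if 0 < r.1.length then (st.1 ++ r.1, r.2) else (st.1, r.2)

def paraxmlN (start : String) (main : List String) (term : String) : String :=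
  let st := main.foldl pvStepA (start.toList, "n")
  String.ofList (st.1 ++ term.toList ++ ['\n'])

-- ===== PORT B =====
-- B's chained replaces, '&' first (port of Source B's l.replace(...).replace(...)... chain)
def pvEscLine (l : List Char) : List Char :=
  PySem.Chars.replace
    (PySem.Chars.replace
      (PySem.Chars.replace
        (PySem.Chars.replace l ['&'] "&amp;".toList)
        ['<'] "&lt;".toList)
      ['>'] "&gt;".toList)
    ['"'] "&quot;".toList

-- the body of B's loop: boolean inpre state
def pvStepB (st : List Char × Bool) (x : String) : List Char × Bool :=
  let l := PySem.Chars.rstrip x.toList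
  if PySem.Chars.isIn "<pre>".toList l then (st.1 ++ l ++ ['\n'], true)
  else if PySem.Chars.isIn "</pre>".toList l then (st.1 ++ l ++ ['\n'], false)
  else
    let esc := pvEscLine l
    if st.2 then (st.1 ++ "<preline>".toList ++ esc ++ "</preline>\n".toList, st.2)
    else (st.1 ++ esc ++ ['\n'], st.2)

def paraxmlN_alt (start : String) (main : List String) (term : String) : String :=
  let st := main.foldl pvStepB (start.toList, false)
  String.ofList (st.1 ++ term.toList ++ ['\n'])

-- ===== PRECONDITION & SPEC =====
def Spec_paraxmlN (start : String) (main : List String) (term : String) (out : String) : Prop := out = paraxmlN_alt start main term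
instance (start : String) (main : List String) (term : String) (out : String) : Decidable (Spec_paraxmlN start main term out) := by unfold Spec_paraxmlN; infer_instance

-- ===== CLAIM (what is proved, stated in full; the proofs are below) =====
def Claim_equal_paraxmlN : Prop := ∀ (start : String) (main : List String) (term : String), Dom_paraxmlN start main term → Spec_paraxmlN start main term (paraxmlN start main term)

-- ===== LEMMAS AND PROOFS =====

-- the combined per-character escape ('&' case first, as B's first replace pass acts first)
def pvE (c : Char) : List Char :=
  if c = '&' then "&amp;".toList
  else if c = '<' then "&lt;".toList
  else if c = '>' then "&gt;".toList
  else if c = '"' then "&quot;".toList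
  else [c]

lemma pvEscA_eq_pvE (c : Char) : pvEscA c = pvE c := by
  unfold pvEscA pvE
  by_cases h1 : c = '<' <;> by_cases h2 : c = '>' <;> by_cases h3 : c = '&' <;>
    by_cases h4 : c = '"' <;> simp_all

lemma pv_join_nil (parts : List (List Char)) : PySem.Chars.join [] parts = parts.flatten := by
  induction parts with
  | nil => simp [PySem.Chars.join_nil]
  | cons p ps ih =>
    cases ps with
    | nil => simp [PySem.Chars.join_singleton]
    | cons q qs => simpa [PySem.Chars.join_cons_cons] using ih

-- replace with a single-character pattern is a per-character flatMap
lemma pv_replace_go_single (a : Char) (new : List Char) :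
    ∀ (fuel : Nat) (l acc : List Char), l.length ≤ fuel →
      PySem.Chars.replace.go [a] new fuel l acc
        = acc.reverse ++ l.flatMap (fun c => if c = a then new else [c]) := by
  intro fuel
  induction fuel with
  | zero =>
    intro l acc h
    have : l = [] := List.eq_nil_of_length_eq_zero (Nat.le_zero.mp h)
    subst this
    simp [PySem.Chars.replace.go]
  | succ n ih =>
    intro l acc h
    cases l with
    | nil => simp [PySem.Chars.replace.go]
    | cons c t =>
      by_cases hc : c = a
      · subst hc
        have hpre : List.isPrefixOf [c] (c :: t) = true := by simp [List.isPrefixOf]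
        rw [PySem.Chars.replace.go]
        simp only [hpre, if_pos, List.length_cons, List.length_nil, List.drop_succ_cons,
          List.drop_zero]
        rw [ih t (new.reverse ++ acc) (by simpa using Nat.lt_succ_iff.mp (by simpa using h))]
        simp
      · have hpre : List.isPrefixOf [a] (c :: t) = false := by
          simp [List.isPrefixOf]; exact fun h' => (hc h'.symm).elim
        rw [PySem.Chars.replace.go]
        simp only [hpre]
        rw [ih t (c :: acc) (by simpa using Nat.lt_succ_iff.mp (by simpa using h))]
        simp [hc]

lemma pv_replace_single (l : List Char) (a : Char) (new : List Char) :
    PySem.Chars.replace l [a] new = l.flatMap (fun c => if c = a then new else [c]) := by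
  unfold PySem.Chars.replace
  simp only [List.isEmpty_cons, Bool.false_eq_true, if_false]
  simpa using pv_replace_go_single a new l.length l [] (le_refl _)

lemma pvEscLine_eq_flatMap (l : List Char) : pvEscLine l = l.flatMap pvE := by
  unfold pvEscLine
  rw [pv_replace_single, pv_replace_single, pv_replace_single, pv_replace_single,
      List.flatMap_assoc, List.flatMap_assoc, List.flatMap_assoc]
  congr 1
  funext c
  by_cases h1 : c = '&'
  · subst h1; decide
  · by_cases h2 : c = '<'
    · subst h2; decide
    · by_cases h3 : c = '>'
      · subst h3; decide
      · by_cases h4 : c = '"'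
        · subst h4; decide
        · simp [pvE, h1, h2, h3, h4]

lemma pv_flatten_singleton (f : Char → List Char) (l : List Char) :
    (List.map (fun c => [f c]) l).flatten = List.map f l := by
  induction l with
  | nil => rfl
  | cons c t ih => simp [ih]

lemma pv_step_eq (acc : List Char) (b : Bool) (x : String) :
    pvStepA (acc, if b then "y" else "n") x
      = ((pvStepB (acc, b) x).1, if (pvStepB (acc, b) x).2 then "y" else "n") := by
  simp only [pvStepA, pvStepB, pvXmlizeA]
  set l := PySem.Chars.rstrip x.toList with hl
  by_cases h1 : PySem.Chars.find l ['<', 'p', 'r', 'e', '>'] = -1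
  · by_cases h2 : PySem.Chars.find l ['<', '/', 'p', 'r', 'e', '>'] = -1
    · have h1b : PySem.Chars.isIn ['<', 'p', 'r', 'e', '>'] l = false := by
        simp [PySem.Chars.isIn]; exact h1
      have h2b : PySem.Chars.isIn ['<', '/', 'p', 'r', 'e', '>'] l = false := by
        simp [PySem.Chars.isIn]; exact h2
      have hesc : (List.map pvEscA l).flatten = pvEscLine l := by
        rw [pvEscLine_eq_flatMap, List.flatMap_def]
        congr 1
        exact List.map_congr_left (fun c _ => pvEscA_eq_pvE c)
      cases b <;>
        simp [h1, h2, h1b, h2b, pv_join_nil, pv_flatten_singleton, hesc, List.append_assoc]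
    · have h1b : PySem.Chars.isIn ['<', 'p', 'r', 'e', '>'] l = false := by
        simp [PySem.Chars.isIn]; exact h1
      have h2b : PySem.Chars.isIn ['<', '/', 'p', 'r', 'e', '>'] l = true := by
        simp [PySem.Chars.isIn, bne_iff_ne]; exact h2
      simp [h1, h2, h1b, h2b, List.append_assoc]
  · have h1b : PySem.Chars.isIn ['<', 'p', 'r', 'e', '>'] l = true := by
      simp [PySem.Chars.isIn, bne_iff_ne]; exact h1
    simp [h1, h1b, List.append_assoc]

lemma pv_loop_eq (ms : List String) : ∀ (acc : List Char) (b : Bool),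
    ms.foldl pvStepA (acc, if b then "y" else "n")
      = ((ms.foldl pvStepB (acc, b)).1, if (ms.foldl pvStepB (acc, b)).2 then "y" else "n") := by
  induction ms with
  | nil => intro acc b; rfl
  | cons x xs ih =>
    intro acc b
    simp only [List.foldl_cons]
    rw [pv_step_eq acc b x, ih (pvStepB (acc, b) x).1 (pvStepB (acc, b) x).2]
    rw [Prod.mk.eta]
    rfl

-- ===== VERDICT (by name: the statement is the Claim_ definition above) =====
theorem paraxmlN_spec : Claim_equal_paraxmlN := by
  intro start main term _
  unfold Spec_paraxmlN paraxmlN paraxmlN_alt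
  have := pv_loop_eq main start.toList false
  simp only [Bool.false_eq_true, if_false] at this
  rw [this]
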